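-- pv_equiv track=rewrite | github.com/imranblr/CodeWars | CharCodeCalculation.py | calc
-- ===== SOURCE A (Python) =====
-- def calc(x):
--     total1=""
--     total2=""
--     sum1=0
--     sum2=0
--     for i in list(x):
--         total1+=str(ord(i))
--     for j in list(total1):
--         if j == '7': total2+='1'
--         else: total2+=str(j)
--     for k in list(total1): sum1+=int(k)
--     for k in list(total2): sum2+=int(k)
--     return (sum1-sum2)
-- ===== SOURCE B (Python) =====
-- def calc(x):
--     s = "".join(str(ord(c)) for c in x)
--     return 6 * sum(c == '7' for c in s)
-- ===== Notes on version B (the rewrite author's own statement) =====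
-- stated objective: faster
-- what changed: Replaces A's four passes (build via repeated string concatenation, per-char substitution into a second string, then two per-digit int() summing loops) with a single join plus a count of '7' digits multiplied by 6, using the fact that only the 7->1 substitutions change the digit sum and each changes it by exactly 6.
import Mathlib
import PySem

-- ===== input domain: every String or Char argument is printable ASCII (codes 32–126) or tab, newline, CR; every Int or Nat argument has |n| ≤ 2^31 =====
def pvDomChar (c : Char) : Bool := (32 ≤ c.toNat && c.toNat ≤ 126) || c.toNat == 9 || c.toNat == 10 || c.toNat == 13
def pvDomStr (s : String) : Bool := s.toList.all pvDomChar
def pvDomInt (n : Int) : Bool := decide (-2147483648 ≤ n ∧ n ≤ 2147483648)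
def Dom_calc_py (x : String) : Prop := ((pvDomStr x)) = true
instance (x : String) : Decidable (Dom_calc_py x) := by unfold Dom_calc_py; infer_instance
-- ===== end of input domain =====

-- B replaces A's four passes by one join plus counting '7' digits times 6 (same result; simpler).

-- ===== PORT A =====
-- str(ord(i)) = PySem.Int.toChars c.toNat; int(k) on a single digit char = PySem.Int.ofChars? [k]
-- (total1 consists only of decimal digits, so ofChars? never returns none; .getD 0 is unreachable).
def calc_py (x : String) : Int :=
  let total1 : List Char := x.toList.foldl (fun acc i => acc ++ PySem.Int.toChars (i.toNat : Int)) []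
  let total2 : List Char := total1.foldl (fun acc j => if j == '7' then acc ++ ['1'] else acc ++ [j]) []
  let sum1 : Int := total1.foldl (fun s k => s + (PySem.Int.ofChars? [k]).getD 0) 0
  let sum2 : Int := total2.foldl (fun s k => s + (PySem.Int.ofChars? [k]).getD 0) 0
  sum1 - sum2

-- ===== PORT B =====
-- ''.join(str(ord(c)) for c in x) = flatMap of the digit chars; sum(c == '7' for c in s) as a fold of 0/1.
def calc_py_alt (x : String) : Int :=
  let s : List Char := x.toList.flatMap (fun c => PySem.Int.toChars (c.toNat : Int))
  6 * s.foldl (fun acc c => acc + (if c == '7' then 1 else 0)) 0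

-- ===== PRECONDITION & SPEC =====
def Spec_calc_py (x : String) (out : Int) : Prop := out = calc_py_alt x
instance (x : String) (out : Int) : Decidable (Spec_calc_py x out) := by unfold Spec_calc_py; infer_instance

-- ===== CLAIM (what is proved, stated in full; the proofs are below) =====
def Claim_equal_calc_py : Prop := ∀ (x : String), Dom_calc_py x → Spec_calc_py x (calc_py x)

-- ===== LEMMAS AND PROOFS =====

lemma pv_sum_diff (l : List Char) :
    (l.map (fun k => (PySem.Int.ofChars? [k]).getD 0)).sum
      - ((l.map (fun j => if j == '7' then '1' else j)).map
          (fun k => (PySem.Int.ofChars? [k]).getD 0)).sum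
      = 6 * ((l.map (fun c => if c == '7' then (1 : Int) else 0)).sum) := by
  induction l with
  | nil => simp
  | cons c t ih =>
    by_cases hc : c = '7'
    · subst hc
      have h6 : ((PySem.Int.ofChars? ['7']).getD 0 : Int)
          - ((PySem.Int.ofChars? ['1']).getD 0 : Int) = 6 := by decide
      simp only [List.map_cons, List.sum_cons, beq_self_eq_true, if_true]
      omega
    · have hb : (c == '7') = false := by simpa using hc
      simp only [List.map_cons, List.sum_cons, hb, Bool.false_eq_true, if_false]
      omega

lemma pv_foldl_append_sing (l : List Char) (acc : List Char) :
    l.foldl (fun acc j => if j == '7' then acc ++ ['1'] else acc ++ [j]) acc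
      = acc ++ l.map (fun j => if j == '7' then '1' else j) := by
  induction l generalizing acc with
  | nil => simp
  | cons c t ih =>
    rw [List.foldl_cons, ih]
    by_cases hb : (c == '7') = true
    · have hc : c = '7' := by simpa using hb
      subst hc; simp
    · have hc : c ≠ '7' := by simpa using hb
      simp [hc]

lemma pv_foldl_flat (l : List Char) (acc : List Char) :
    l.foldl (fun acc i => acc ++ PySem.Int.toChars (i.toNat : Int)) acc
      = acc ++ l.flatMap (fun c => PySem.Int.toChars (c.toNat : Int)) := by
  induction l generalizing acc with
  | nil => simp
  | cons c t ih => simp [ih, List.append_assoc]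

lemma pv_foldl_add (f : Char → Int) (l : List Char) (a : Int) :
    l.foldl (fun s k => s + f k) a = a + (l.map f).sum := by
  induction l generalizing a with
  | nil => simp
  | cons c t ih => simp [ih]; ring

-- ===== VERDICT (by name: the statement is the Claim_ definition above) =====
theorem calc_py_spec : Claim_equal_calc_py := by
  intro x _
  unfold Spec_calc_py calc_py calc_py_alt
  simp only [pv_foldl_flat, List.nil_append, pv_foldl_append_sing,
    pv_foldl_add (fun k => (PySem.Int.ofChars? [k]).getD 0),
    pv_foldl_add (fun c => if c == '7' then (1 : Int) else 0),
    zero_add]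
  exact pv_sum_diff _
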